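-- pv_equiv track=rewrite | github.com/seifreed/r2inspect | scripts/governance_gates.py | _ordered_traceability_failure_groups
-- ===== SOURCE A (Python) =====
-- def _ordered_traceability_failure_groups(
--     failure_groups: dict[str, list[dict[str, str]]]
-- ) -> dict[str, list[dict[str, str]]]:
--     order = (
--         "missing_file",
--         "malformed_traceability_table",
--         "missing_touched_requirements",
--         "unknown_touched_requirement",
--         "unmapped_requirement",
--         "multi_phase_mapping",
--         "unknown_mapped_phase",
--         "state_mapping_mismatch",
--     )
--     ordered: dict[str, list[dict[str, str]]] = {}
--     for key in order:
--         if key in failure_groups: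
--             ordered[key] = failure_groups[key]
--     for key in sorted(failure_groups):
--         if key not in ordered:
--             ordered[key] = failure_groups[key]
--     return ordered
-- ===== SOURCE B (Python) =====
-- def _ordered_traceability_failure_groups(
--     failure_groups: dict[str, list[dict[str, str]]]
-- ) -> dict[str, list[dict[str, str]]]:
--     order = (
--         "missing_file",
--         "malformed_traceability_table",
--         "missing_touched_requirements",
--         "unknown_touched_requirement",
--         "unmapped_requirement",
--         "multi_phase_mapping",
--         "unknown_mapped_phase",
--         "state_mapping_mismatch",
--     )
--     rank = {key: i for i, key in enumerate(order)}
--     return {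
--         key: failure_groups[key]
--         for key in sorted(failure_groups, key=lambda k: (rank.get(k, len(order)), k))
--     }
-- ===== Notes on version B (the rewrite author's own statement) =====
-- stated objective: simpler
-- what changed: A's two sequential loops (priority pass over the fixed tuple, then an alphabetical pass over the remaining keys with a membership check) are replaced by one dict comprehension over a single keyed sort: keys are sorted by (rank in the priority tuple, defaulting past the end, then the key itself).
import Mathlib
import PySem

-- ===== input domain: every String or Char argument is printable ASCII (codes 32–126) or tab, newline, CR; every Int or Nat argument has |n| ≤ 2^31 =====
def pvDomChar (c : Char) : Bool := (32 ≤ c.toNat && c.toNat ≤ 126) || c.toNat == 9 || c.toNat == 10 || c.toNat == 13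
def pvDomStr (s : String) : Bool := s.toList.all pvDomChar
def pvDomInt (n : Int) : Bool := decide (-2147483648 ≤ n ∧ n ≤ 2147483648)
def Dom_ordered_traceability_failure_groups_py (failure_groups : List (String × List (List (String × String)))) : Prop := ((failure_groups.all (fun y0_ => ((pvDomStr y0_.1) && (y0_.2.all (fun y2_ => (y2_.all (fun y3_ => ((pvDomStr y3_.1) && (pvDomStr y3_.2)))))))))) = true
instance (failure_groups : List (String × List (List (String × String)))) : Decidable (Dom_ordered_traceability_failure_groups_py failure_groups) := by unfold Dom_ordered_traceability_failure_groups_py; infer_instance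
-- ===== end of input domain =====

-- B replaces A's two sequential dict-building loops by a single keyed sort (rank in the
-- priority tuple, then the key) wrapped in one dict comprehension: a simpler decomposition.


-- the fixed priority tuple `order` (shared data of both programs)
def pvOrder : List String :=
  ["missing_file", "malformed_traceability_table", "missing_touched_requirements",
   "unknown_touched_requirement", "unmapped_requirement", "multi_phase_mapping",
   "unknown_mapped_phase", "state_mapping_mismatch"]

-- dict lookup failure_groups[key] (first match; only used under a presence guard)
def pvGet (fg : List (String × List (List (String × String)))) (k : String) :
    List (List (String × String)) :=
  ((fg.find? (fun p => p.1 == k)).map Prod.snd).getD []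

-- ===== PORT A =====
def ordered_traceability_failure_groups_py (failure_groups : List (String × List (List (String × String)))) : List (String × List (List (String × String))) :=
  -- ordered = {}; for key in order: if key in failure_groups: ordered[key] = failure_groups[key]
  let ordered1 : PySem.Dict String (List (List (String × String))) :=
    pvOrder.foldl
      (fun d key => if failure_groups.any (fun p => p.1 == key) then d.insert key (pvGet failure_groups key) else d)
      PySem.Dict.empty
  -- for key in sorted(failure_groups): if key not in ordered: ordered[key] = failure_groups[key]
  let ordered2 :=
    (PySem.List.sorted (failure_groups.map Prod.fst) (fun k => k) false).foldl
      (fun d key => if d.contains key then d else d.insert key (pvGet failure_groups key))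
      ordered1
  ordered2.items

-- ===== PORT B =====
def ordered_traceability_failure_groups_py_alt (failure_groups : List (String × List (List (String × String)))) : List (String × List (List (String × String))) :=
  -- rank = {key: i for i, key in enumerate(order)}
  let rank : PySem.Dict String Int :=
    (PySem.List.enumerate pvOrder 0).foldl (fun d p => d.insert p.2 p.1) PySem.Dict.empty
  -- {key: failure_groups[key] for key in sorted(failure_groups, key=lambda k: (rank.get(k, len(order)), k))}
  (PySem.List.sorted2 (failure_groups.map Prod.fst)
      (fun k => rank.getD k (pvOrder.length : Int)) (fun k => k) false).map
    (fun k => (k, pvGet failure_groups k))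

-- ===== PRECONDITION & SPEC =====
-- Pre_ excludes association lists with duplicate keys: they do not encode any Python dict
-- (A's parameter type dict[str, ...] forces distinct keys), so the assoc-list reading of
-- either program there corresponds to no Python behaviour.
def Pre_ordered_traceability_failure_groups_py (failure_groups : List (String × List (List (String × String)))) : Prop :=
  (failure_groups.map Prod.fst).Nodup
instance (failure_groups : List (String × List (List (String × String)))) : Decidable (Pre_ordered_traceability_failure_groups_py failure_groups) := by unfold Pre_ordered_traceability_failure_groups_py; infer_instance

def pvWitness_ordered_traceability_failure_groups_py : (List (String × List (List (String × String)))) :=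
  [("zzz", []), ("missing_file", [[("requirement", "R1")]])]

def Spec_ordered_traceability_failure_groups_py (failure_groups : List (String × List (List (String × String)))) (out : List (String × List (List (String × String)))) : Prop := out = ordered_traceability_failure_groups_py_alt failure_groups
instance (failure_groups : List (String × List (List (String × String)))) (out : List (String × List (List (String × String)))) : Decidable (Spec_ordered_traceability_failure_groups_py failure_groups out) := by unfold Spec_ordered_traceability_failure_groups_py; infer_instance

-- ===== CLAIM (what is proved, stated in full; the proofs are below) =====
def Claim_equal_ordered_traceability_failure_groups_py : Prop := ∀ (failure_groups : List (String × List (List (String × String)))), Dom_ordered_traceability_failure_groups_py failure_groups → Pre_ordered_traceability_failure_groups_py failure_groups → Spec_ordered_traceability_failure_groups_py failure_groups (ordered_traceability_failure_groups_py failure_groups)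

-- ===== LEMMAS AND PROOFS =====

def pvRank : PySem.Dict String Int :=
  (PySem.List.enumerate pvOrder 0).foldl (fun d p => d.insert p.2 p.1) PySem.Dict.empty
theorem pvRank_keys : pvRank.keys = pvOrder := by decide

theorem pvRank_getD_of_not_mem (k : String) (h : k ∉ pvOrder) : pvRank.getD k 8 = 8 := by
  have hn : pvRank.get? k = none := by
    rw [PySem.Dict.get?_eq_none_iff_not_mem_keys, pvRank_keys]; exact h
  simp [PySem.Dict.getD, hn]

theorem pvRank_getD_lt_of_mem (k : String) (h : k ∈ pvOrder) : pvRank.getD k 8 < 8 := by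
  simp only [pvOrder, List.mem_cons, List.not_mem_nil, or_false] at h
  rcases h with rfl|rfl|rfl|rfl|rfl|rfl|rfl|rfl <;> decide

theorem sorted2_eq_sorted_toLex {α κ₁ κ₂ : Type} [LinearOrder κ₁] [LinearOrder κ₂]
    (xs : List α) (k1 : α → κ₁) (k2 : α → κ₂) :
    PySem.List.sorted2 xs k1 k2 false
      = PySem.List.sorted xs (fun x => toLex (k1 x, k2 x)) false := by
  unfold PySem.List.sorted2 PySem.List.sorted
  simp only [if_neg (by decide : ¬ (false = true))]
  have hb : (fun a b => decide (k1 a < k1 b) || (!decide (k1 b < k1 a) && decide (k2 a < k2 b)))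
      = (fun a b => decide (toLex (k1 a, k2 a) < toLex (k1 b, k2 b))) := by
    funext a b
    rcases lt_trichotomy (k1 a) (k1 b) with h|h|h
    · simp [Prod.Lex.lt_iff, h]
    · simp [Prod.Lex.lt_iff, h]
    · simp [Prod.Lex.lt_iff, h, not_lt_of_gt h, ne_of_gt h]
  rw [hb]

theorem foldl_setdefault_items {κ ν : Type} [BEq κ] [LawfulBEq κ]
    (l : List κ) (f : κ → ν) (d : PySem.Dict κ ν) (hl : l.Nodup) :
    (l.foldl (fun d k => if d.contains k then d else d.insert k (f k)) d).items
      = d.items ++ (l.filter (fun k => !(d.contains k))).map (fun k => (k, f k)) := by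
  induction l generalizing d with
  | nil => simp
  | cons a t ih =>
    rcases List.nodup_cons.mp hl with ⟨ha, ht⟩
    simp only [List.foldl_cons, List.filter_cons]
    by_cases h : d.contains a = true
    · rw [if_pos h, if_neg (show ¬ (!d.contains a) = true by simp [h])]
      exact ih d ht
    · have h' : d.contains a = false := by simpa using h
      rw [if_neg h, if_pos (show (!d.contains a) = true by simp [h'])]
      rw [ih (d.insert a (f a)) ht, PySem.Dict.items_insert_of_not_contains d (f a) h']
      have hf : t.filter (fun k => !((d.insert a (f a)).contains k))
          = t.filter (fun k => !(d.contains k)) := by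
        apply List.filter_congr
        intro x hx
        have : (x == a) = false := by simp; exact fun he => ha (he ▸ hx)
        rw [PySem.Dict.contains_insert, this, Bool.false_or]
      rw [hf]; simp

def pvLexKey (k : String) : Lex (Int × String) := toLex (pvRank.getD k 8, k)
theorem pvOrder_nodup : pvOrder.Nodup := by decide
theorem pvOrder_pairwise_lex : pvOrder.Pairwise (fun a b => pvLexKey a < pvLexKey b) := by decide

theorem pres_eq (fg : List (String × List (List (String × String)))) (k : String) :
    (fg.any (fun p => p.1 == k)) = decide (k ∈ fg.map Prod.fst) := by
  induction fg with
  | nil => rfl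
  | cons p t ih =>
    simp only [List.any_cons, List.map_cons, List.mem_cons, ih]
    by_cases h : p.1 = k
    · simp [h]
    · simp [h, Ne.symm h]

theorem foldl_if_filter {α β : Type} (l : List α) (c : α → Bool) (g : β → α → β) (d : β) :
    l.foldl (fun d k => if c k then g d k else d) d = (l.filter c).foldl g d := by
  induction l generalizing d with
  | nil => rfl
  | cons a t ih =>
    simp only [List.foldl_cons, List.filter_cons]
    by_cases h : c a = true <;> simp [h, ih]

theorem pv_main (fg : List (String × List (List (String × String))))
    (hnd : (fg.map Prod.fst).Nodup) :
    ordered_traceability_failure_groups_py fg = ordered_traceability_failure_groups_py_alt fg := by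
  have hpres := pres_eq fg
  set keys := fg.map Prod.fst with hkeys
  set pair := fun k => (k, pvGet fg k) with hpair
  set Pk := pvOrder.filter (fun key => fg.any fun p => p.1 == key) with hPk
  set S := PySem.List.sorted keys (fun k => k) false with hS
  set Rk := S.filter (fun k => !decide (k ∈ pvOrder)) with hRk
  have hSnd : S.Nodup := (PySem.List.sorted_perm keys (fun k => k) false).nodup_iff.mpr hnd
  have hPknd : Pk.Nodup := pvOrder_nodup.filter _
  have hfold1 : pvOrder.foldl
      (fun d key => if fg.any (fun p => p.1 == key) then d.insert key (pvGet fg key) else d)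
      PySem.Dict.empty
      = Pk.foldl (fun d key => d.insert key (pvGet fg key)) PySem.Dict.empty :=
    foldl_if_filter _ _ _ _
  set o1 := Pk.foldl (fun d key => d.insert key (pvGet fg key)) PySem.Dict.empty with ho1
  have h1 : o1.items = Pk.map pair := by
    rw [ho1, PySem.Dict.items_foldl_insert_fresh Pk (fun a => a) (pvGet fg) PySem.Dict.empty
      (fun a _ => PySem.Dict.contains_empty a) (by simpa using hPknd)]
    simp [hpair, show (PySem.Dict.empty : PySem.Dict String (List (List (String × String)))).items = [] from rfl]
  have hkeys1 : o1.keys = Pk := by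
    show o1.items.map Prod.fst = Pk
    rw [h1]; simp [hpair, Function.comp_def]
  have hcont1 : ∀ k, o1.contains k = decide (k ∈ Pk) := fun k => by
    rw [PySem.Dict.contains_eq_decide_mem_keys, hkeys1]
  have hA : ordered_traceability_failure_groups_py fg = Pk.map pair ++ Rk.map pair := by
    show (S.foldl (fun d key => if d.contains key then d else d.insert key (pvGet fg key))
      (pvOrder.foldl
        (fun d key => if fg.any (fun p => p.1 == key) then d.insert key (pvGet fg key) else d)
        PySem.Dict.empty)).items = _
    rw [hfold1, foldl_setdefault_items S (pvGet fg) o1 hSnd, h1]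
    congr 1
    rw [hRk]
    congr 1
    apply List.filter_congr
    intro k hkS
    have hkkeys : k ∈ keys := (PySem.List.mem_sorted keys (fun k => k) false k).mp hkS
    rw [hcont1 k]
    congr 1
    rw [decide_eq_decide]
    rw [hPk]
    simp only [List.mem_filter, hpres k, decide_eq_true_eq]
    exact ⟨fun ⟨h, _⟩ => h, fun h => ⟨h, hkkeys⟩⟩
  have hB : ordered_traceability_failure_groups_py_alt fg = (PySem.List.sorted keys pvLexKey false).map pair := by
    show (PySem.List.sorted2 keys
      (fun k => PySem.Dict.getD
        ((PySem.List.enumerate pvOrder 0).foldl (fun d p => d.insert p.2 p.1) PySem.Dict.empty)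
        k (pvOrder.length : Int)) (fun k => k) false).map pair = _
    rw [sorted2_eq_sorted_toLex]
    rfl
  have hperm : (Pk ++ Rk).Perm keys := by
    have h2 : Rk.Perm (keys.filter (fun k => !decide (k ∈ pvOrder))) :=
      (PySem.List.sorted_perm keys (fun k => k) false).filter _
    have h3 : Pk.Perm (keys.filter (fun k => decide (k ∈ pvOrder))) := by
      rw [List.perm_ext_iff_of_nodup hPknd (hnd.filter _)]
      intro a
      simp only [hPk, List.mem_filter, hpres a, decide_eq_true_eq]
      exact ⟨fun ⟨h, h'⟩ => ⟨h', h⟩, fun ⟨h, h'⟩ => ⟨h', h⟩⟩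
    exact (h3.append h2).trans (List.filter_append_perm _ keys)
  have hrank8 : ∀ k, k ∉ pvOrder → pvRank.getD k 8 = 8 := pvRank_getD_of_not_mem
  have hpw : (Pk ++ Rk).Pairwise (fun a b => pvLexKey a < pvLexKey b) := by
    rw [List.pairwise_append]
    refine ⟨List.Pairwise.sublist List.filter_sublist pvOrder_pairwise_lex, ?_, ?_⟩
    · have hS1 : S.Pairwise (fun a b : String => a < b) := by
        have hle := PySem.List.sorted_pairwise keys (fun k : String => k)
        have hne : S.Pairwise (fun a b : String => a ≠ b) := hSnd
        exact (hle.and hne).imp (fun h => lt_of_le_of_ne h.1 h.2)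
      have h3 : Rk.Pairwise (fun a b : String => a < b) := List.Pairwise.sublist List.filter_sublist hS1
      refine h3.imp_of_mem ?_
      intro a b ha hb hab
      have ha' : a ∉ pvOrder := by simpa using (List.mem_filter.mp ha).2
      have hb' : b ∉ pvOrder := by simpa using (List.mem_filter.mp hb).2
      show pvLexKey a < pvLexKey b
      rw [pvLexKey, pvLexKey, Prod.Lex.lt_iff]
      right
      exact ⟨by simp [hrank8 a ha', hrank8 b hb'], hab⟩
    · intro a ha b hb
      have ha' : a ∈ pvOrder := (List.mem_filter.mp ha).1
      have hb' : b ∉ pvOrder := by simpa using (List.mem_filter.mp hb).2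
      show pvLexKey a < pvLexKey b
      rw [pvLexKey, pvLexKey, Prod.Lex.lt_iff]
      left
      show pvRank.getD a 8 < pvRank.getD b 8
      rw [hrank8 b hb']
      exact pvRank_getD_lt_of_mem a ha'
  have hsorted : PySem.List.sorted keys pvLexKey false = Pk ++ Rk :=
    PySem.List.sorted_eq_of_perm_of_pairwise_lt keys (Pk ++ Rk) pvLexKey hperm hpw
  rw [hA, hB, hsorted, List.map_append]

-- ===== VERDICT (by name: the statement is the Claim_ definition above) =====
theorem ordered_traceability_failure_groups_py_spec : Claim_equal_ordered_traceability_failure_groups_py := by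
  intro fg _hdom hnd
  unfold Spec_ordered_traceability_failure_groups_py
  exact pv_main fg hnd
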